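-- pv_equiv track=rewrite | github.com/d23aiin-ctrl/d23 | API/common/graph/nodes/stock_price.py | _iter_results
-- ===== SOURCE A (Python) =====
-- def _iter_results(results: list) -> list:
--     preferred_domains = ("groww.in", "moneycontrol.com", "screener.in", "etmoney.com", "nseindia.com")
--     preferred = []
--     rest = []
--     for item in results:
--         link = (item.get("link") or "").lower()
--         if any(domain in link for domain in preferred_domains):
--             preferred.append(item)
--         else:
--             rest.append(item)
--     return preferred + rest
-- ===== SOURCE B (Python) =====
-- def _iter_results(results: list) -> list:
--     preferred_domains = ("groww.in", "moneycontrol.com", "screener.in", "etmoney.com", "nseindia.com")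
--     return sorted(
--         results,
--         key=lambda item: 0 if any(domain in (item.get("link") or "").lower() for domain in preferred_domains) else 1,
--     )
-- ===== Notes on version B (the rewrite author's own statement) =====
-- stated objective: idiomatic
-- what changed: Replaces the two-accumulator partition loop with a single stable sort on a binary key (0 for preferred-domain links, 1 otherwise); Python's sort stability reproduces preferred+rest exactly.
import Mathlib
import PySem

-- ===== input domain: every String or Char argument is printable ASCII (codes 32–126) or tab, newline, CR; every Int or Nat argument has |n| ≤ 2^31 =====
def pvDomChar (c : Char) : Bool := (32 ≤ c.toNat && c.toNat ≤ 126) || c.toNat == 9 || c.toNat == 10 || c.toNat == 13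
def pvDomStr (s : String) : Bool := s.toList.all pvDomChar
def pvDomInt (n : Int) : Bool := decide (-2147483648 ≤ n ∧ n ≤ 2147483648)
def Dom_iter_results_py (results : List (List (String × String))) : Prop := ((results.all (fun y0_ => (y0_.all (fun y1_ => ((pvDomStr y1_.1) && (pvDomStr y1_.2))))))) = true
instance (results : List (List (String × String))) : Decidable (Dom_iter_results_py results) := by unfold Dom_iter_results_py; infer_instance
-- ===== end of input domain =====

-- B replaces A's two-accumulator partition loop by one stable sort on a binary key (idiomatic; not faster).


-- ===== PORT A =====
-- the tuple of preferred domains, shared verbatim by both Pythons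
def pvPreferredDomains : List String :=
  ["groww.in", "moneycontrol.com", "screener.in", "etmoney.com", "nseindia.com"]

-- any(domain in (item.get("link") or "").lower() for domain in preferred_domains)
-- '(item.get("link") or "")' : get returns None when the key is missing; 'or ""' maps None (and only
-- the already-empty string) to "" — exactly Option.getD "" on string-valued dicts.
def pvIsPreferred (item : List (String × String)) : Bool :=
  pvPreferredDomains.any (fun domain =>
    PySem.Str.isIn domain (PySem.Str.lower ((PySem.Dict.get? (PySem.Dict.mk item) "link").getD "")))

-- the for-loop over results, carrying the two accumulators (preferred, rest)
def iter_results_py (results : List (List (String × String))) : List (List (String × String)) :=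
  let st := results.foldl
    (fun (pr : List (List (String × String)) × List (List (String × String))) item =>
      if pvIsPreferred item then (pr.1 ++ [item], pr.2) else (pr.1, pr.2 ++ [item]))
    ([], [])
  st.1 ++ st.2

-- ===== PORT B =====
-- sorted(results, key=lambda item: 0 if any(...) else 1)  — stable sort on a binary key
def iter_results_py_alt (results : List (List (String × String))) : List (List (String × String)) :=
  PySem.List.sorted results (fun item => if pvIsPreferred item then (0 : Int) else 1) false

-- ===== PRECONDITION & SPEC =====
def Spec_iter_results_py (results : List (List (String × String))) (out : List (List (String × String))) : Prop := out = iter_results_py_alt results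
instance (results : List (List (String × String))) (out : List (List (String × String))) : Decidable (Spec_iter_results_py results out) := by unfold Spec_iter_results_py; infer_instance

-- ===== CLAIM (what is proved, stated in full; the proofs are below) =====
def Claim_equal_iter_results_py : Prop := ∀ (results : List (List (String × String))), Dom_iter_results_py results → Spec_iter_results_py results (iter_results_py results)

-- ===== LEMMAS AND PROOFS =====

-- A's loop invariant: the fold extends the two accumulators by the two filters.
theorem pvFoldA (p : α → Bool) :
    ∀ (l : List α) (a b : List α),
      l.foldl (fun pr item => if p item then (pr.1 ++ [item], pr.2) else (pr.1, pr.2 ++ [item])) (a, b)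
        = (a ++ l.filter p, b ++ l.filter (fun x => !p x)) := by
  intro l
  induction l with
  | nil => simp
  | cons x l ih =>
    intro a b
    by_cases hx : p x = true <;> simp [List.foldl_cons, hx, ih]

-- inserting a key-0 element into (all-key-0 ++ all-key-1) puts it between the blocks
theorem pvInsert_pref (p : α → Bool) (x : α) (hx : p x = true) :
    ∀ (A B : List α), (∀ a ∈ A, p a = true) → (∀ b ∈ B, p b = false) →
      PySem.List.insertBy
        (fun a b => decide ((if p a then (0 : Int) else 1) < (if p b then (0 : Int) else 1)))
        x (A ++ B) = A ++ x :: B := by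
  intro A
  induction A with
  | nil =>
    intro B _ hB
    cases B with
    | nil => simp [PySem.List.insertBy]
    | cons b B =>
      have hb := hB b (by simp)
      simp [PySem.List.insertBy, hx, hb]
  | cons a A ih =>
    intro B hA hB
    have ha := hA a (by simp)
    simp only [List.cons_append, PySem.List.insertBy, hx, ha]
    simp [ih B (fun y hy => hA y (by simp [hy])) hB]

-- inserting a key-1 element appends it at the end
theorem pvInsert_rest (p : α → Bool) (x : α) (hx : p x = false) (ys : List α) :
    PySem.List.insertBy
      (fun a b => decide ((if p a then (0 : Int) else 1) < (if p b then (0 : Int) else 1)))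
      x ys = ys ++ [x] := by
  apply PySem.List.insertBy_of_forall_not_before
  intro y _
  by_cases hy : p y = true <;> simp [hx, hy]

-- the insertion-sort fold on a binary key computes the stable partition
theorem pvFoldB (p : α → Bool) :
    ∀ (l : List α) (A B : List α), (∀ a ∈ A, p a = true) → (∀ b ∈ B, p b = false) →
      l.foldl (fun acc x =>
          PySem.List.insertBy
            (fun a b => decide ((if p a then (0 : Int) else 1) < (if p b then (0 : Int) else 1)))
            x acc) (A ++ B)
        = (A ++ l.filter p) ++ (B ++ l.filter (fun x => !p x)) := by
  intro l
  induction l with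
  | nil => intro A B _ _; simp
  | cons x l ih =>
    intro A B hA hB
    rw [List.foldl_cons]
    by_cases hx : p x = true
    · rw [pvInsert_pref p x hx A B hA hB,
        show A ++ x :: B = (A ++ [x]) ++ B by simp]
      have h1 : ∀ a ∈ A ++ [x], p a = true := by
        intro a ha
        rcases List.mem_append.1 ha with h | h
        · exact hA a h
        · simp at h; subst h; exact hx
      rw [ih (A ++ [x]) B h1 hB]
      simp [hx]
    · have hx' : p x = false := by simp_all
      rw [pvInsert_rest p x hx' (A ++ B),
        show (A ++ B) ++ [x] = A ++ (B ++ [x]) by simp]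
      have h2 : ∀ b ∈ B ++ [x], p b = false := by
        intro b hb
        rcases List.mem_append.1 hb with h | h
        · exact hB b h
        · simp at h; subst h; exact hx'
      rw [ih A (B ++ [x]) hA h2]
      simp [hx']

-- ===== VERDICT (by name: the statement is the Claim_ definition above) =====
theorem iter_results_py_spec : Claim_equal_iter_results_py := by
  intro results _
  unfold Spec_iter_results_py iter_results_py iter_results_py_alt
  rw [PySem.List.sorted_eq_foldl_insertBy, pvFoldA pvIsPreferred results [] [],
    show ([] : List (List (String × String))) = [] ++ [] from rfl,
    pvFoldB pvIsPreferred results [] [] (by simp) (by simp)]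
  simp
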